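-- pv_equiv track=rewrite | github.com/rishabhmishradev/rozgar24x7-frontend | app/parsing/entity_extractor.py | _group_education_lines
-- ===== SOURCE A (Python) =====
-- def _group_education_lines(lines: list[str]) -> list[list[str]]:
--     """Group education lines into logical entry blocks.
--
--     Each block represents one education entry (institution + degree + location + dates).
--     """
--     blocks: list[list[str]] = []
--     current_block: list[str] = []
--
--     for i, line in enumerate(lines):
--         # Check if this line starts a new education entry
--         # New entries are typically institution names (capitalized, 2-5 words, not a date/year)
--         if (
--             current_block
--             and i > 0
--             and _looks_like_institution_start(line)
--             and not _looks_like_institution_start(lines[i - 1])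
--         ):
--             # We've likely hit the start of a new entry
--             blocks.append(current_block)
--             current_block = [line]
--         else:
--             current_block.append(line)
--
--     if current_block:
--         blocks.append(current_block)
--
--     return blocks
--
-- def _looks_like_institution_start(line: str) -> bool:
--     """Check if a line looks like the start of a NEW education entry (institution name).
--
--     Only returns True for strong institution indicators to avoid false positives
--     on program/degree names that follow the institution.
--
--     Examples of institutions: "University of X", "X Institute", "X School"
--     Counter-examples: "Women Leadership Program", "Bachelor of Science"
--     """
--     if not line:
--         return False
--
--     lower = line.lower()
--
--     # Strong, specific institution keywords - these MUST be present
--     # (not just any capitalized phrase)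
--     institution_keywords = {
--         "university",
--         "institute",
--         "school",
--         "college",
--         "academy",
--         "polytechnic",
--         "iit",
--         "iim",
--         "isb",  # Specific institutions
--     }
--
--     # Only return True if we find a strong keyword
--     return any(kw in lower for kw in institution_keywords)
-- ===== SOURCE B (Python) =====
-- def _looks_like_institution_start(line: str) -> bool:
--     if not line:
--         return False
--     lower = line.lower()
--     institution_keywords = {
--         "university", "institute", "school", "college", "academy",
--         "polytechnic", "iit", "iim", "isb",
--     }
--     return any(kw in lower for kw in institution_keywords)
--
--
-- def _group_education_lines(lines: list[str]) -> list[list[str]]: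
--     """Table-then-split: compute institution flags once, find block boundaries,
--     then slice the list at those boundaries."""
--     flags = [_looks_like_institution_start(l) for l in lines]
--     bounds = [i for i in range(1, len(lines)) if flags[i] and not flags[i - 1]]
--     blocks = []
--     prev = 0
--     for b in bounds:
--         blocks.append(lines[prev:b])
--         prev = b
--     if lines:
--         blocks.append(lines[prev:])
--     return blocks
-- ===== Notes on version B (the rewrite author's own statement) =====
-- stated objective: alternative
-- what changed: Replaced the incremental accumulate-and-flush loop (mutable current_block flushed into blocks at each boundary) by a table-then-split decomposition: compute the institution-flag table once, derive the boundary index list, then slice the input at those boundaries.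
import Mathlib
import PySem

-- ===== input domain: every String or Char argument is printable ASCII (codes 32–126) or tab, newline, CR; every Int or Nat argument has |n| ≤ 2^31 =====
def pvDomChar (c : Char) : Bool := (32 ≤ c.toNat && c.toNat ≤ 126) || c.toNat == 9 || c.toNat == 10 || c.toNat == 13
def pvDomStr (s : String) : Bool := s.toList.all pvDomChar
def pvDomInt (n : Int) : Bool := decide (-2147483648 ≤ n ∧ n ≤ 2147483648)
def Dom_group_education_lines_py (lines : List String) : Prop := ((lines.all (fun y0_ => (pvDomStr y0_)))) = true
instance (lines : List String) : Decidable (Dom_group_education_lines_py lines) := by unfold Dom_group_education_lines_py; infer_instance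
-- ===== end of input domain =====

-- B replaces A's accumulate-and-flush loop by a flag-table + boundary-list + slicing decomposition (alternative, same cost).


-- ===== PORT A =====
-- _looks_like_institution_start: identical in Source A and Source B, so it is shared by both ports.
-- The set literal is iterated only under order-independent `any`, so it is ported as the list
-- of its (distinct) elements.
def looksLikeInstitutionStart (line : String) : Bool :=
  if line == "" then false
  else
    let lower := PySem.Str.lower line
    ["university", "institute", "school", "college", "academy",
     "polytechnic", "iit", "iim", "isb"].any (fun kw => PySem.Str.isIn kw lower)

-- the for-loop of A: i is the enumerate index, (blocks, cur) the mutable state.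
-- Python short-circuits `i > 0 and … lines[i-1] …`, so lines[i-1] is only read when 0 < i,
-- where it is in range; the `.getD ""` default is unreachable there (at i = 0 the
-- conjunct `0 < i` is already false, matching Python's short-circuit).
def groupAuxA (lines : List String) : Nat → List String → List (List String) → List String → List (List String) × List String
  | _, [], blocks, cur => (blocks, cur)
  | i, line :: rest, blocks, cur =>
    if !cur.isEmpty && decide (0 < i) && looksLikeInstitutionStart line
        && !looksLikeInstitutionStart ((PySem.List.pyGet? lines ((i : Int) - 1)).getD "")
    then groupAuxA lines (i + 1) rest (blocks ++ [cur]) [line]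
    else groupAuxA lines (i + 1) rest blocks (cur ++ [line])

def group_education_lines_py (lines : List String) : List (List String) :=
  let st := groupAuxA lines 0 lines [] []
  if st.2.isEmpty then st.1 else st.1 ++ [st.2]

-- ===== PORT B =====
-- Source B: flags table, boundary indices, then slice at the boundaries.
-- flags[i] / flags[i-1] with i from range(1, len(lines)) are always in range, so pyGetD is exact.
def group_education_lines_py_alt (lines : List String) : List (List String) :=
  let flags := lines.map looksLikeInstitutionStart
  let bounds := (PySem.List.pyRange 1 (lines.length : Int) 1).filter
    (fun i => PySem.List.pyGetD flags i false && !(PySem.List.pyGetD flags (i - 1) false))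
  let st := bounds.foldl
    (fun (st : List (List String) × Int) b =>
      (st.1 ++ [PySem.List.slice lines (some st.2) (some b)], b)) ([], 0)
  if !lines.isEmpty then st.1 ++ [PySem.List.slice lines (some st.2) none] else st.1

-- ===== PRECONDITION & SPEC =====
def Spec_group_education_lines_py (lines : List String) (out : List (List String)) : Prop := out = group_education_lines_py_alt lines
instance (lines : List String) (out : List (List String)) : Decidable (Spec_group_education_lines_py lines out) := by unfold Spec_group_education_lines_py; infer_instance

-- ===== CLAIM (what is proved, stated in full; the proofs are below) =====
def Claim_equal_group_education_lines_py : Prop := ∀ (lines : List String), Dom_group_education_lines_py lines → Spec_group_education_lines_py lines (group_education_lines_py lines)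

-- ===== LEMMAS AND PROOFS =====

def loopSpec (cur : List String) (prev : Bool) : List String → List (List String)
  | [] => [cur]
  | l :: ls =>
    if looksLikeInstitutionStart l && !prev then
      cur :: loopSpec [l] (looksLikeInstitutionStart l) ls
    else
      loopSpec (cur ++ [l]) (looksLikeInstitutionStart l) ls

theorem groupAuxA_spec (lines : List String) (ls : List String) (k : Nat)
    (blocks : List (List String)) (cur : List String)
    (hcur : cur ≠ []) (hk : 1 ≤ k) (hdrop : lines.drop k = ls) :
    (groupAuxA lines k ls blocks cur).2 ≠ [] ∧
      (groupAuxA lines k ls blocks cur).1 ++ [(groupAuxA lines k ls blocks cur).2]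
        = blocks ++ loopSpec cur (looksLikeInstitutionStart (lines.getD (k - 1) "")) ls := by
  induction ls generalizing k blocks cur with
  | nil => simpa [groupAuxA, loopSpec] using hcur
  | cons l ls' ih =>
    have hklen : k < lines.length := by
      by_contra h
      rw [List.drop_eq_nil_of_le (by omega)] at hdrop
      exact absurd hdrop (by simp)
    have hgetk : lines[k]? = some l := by
      have := List.getElem?_drop (xs := lines) (i := k) (j := 0)
      simp [hdrop] at this
      simpa using this.symm
    have hdrop' : lines.drop (k + 1) = ls' := by
      have h1 : (lines.drop k).drop 1 = lines.drop (k + 1) := by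
        rw [List.drop_drop]
      rw [← h1, hdrop]; rfl
    have hprev : ((PySem.List.pyGet? lines ((k : Int) - 1)).getD "") = lines.getD (k - 1) "" := by
      have h1 : ((k : Int) - 1) = ((k - 1 : Nat) : Int) := by omega
      rw [h1, PySem.List.pyGet?_natCast]
      simp [List.getD]
    have hgetDk : lines.getD k "" = l := by simp [List.getD, hgetk]
    by_cases hc : (looksLikeInstitutionStart l
        && !looksLikeInstitutionStart (lines.getD (k - 1) "")) = true
    · have hcond : (!cur.isEmpty && decide (0 < k) && looksLikeInstitutionStart l
          && !looksLikeInstitutionStart ((PySem.List.pyGet? lines ((k : Int) - 1)).getD "")) = true := by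
        rw [hprev]
        simp only [Bool.and_eq_true] at hc ⊢
        exact ⟨⟨⟨by simpa using hcur, by simpa using hk⟩, hc.1⟩, hc.2⟩
      have hstep : groupAuxA lines k (l :: ls') blocks cur
          = groupAuxA lines (k + 1) ls' (blocks ++ [cur]) [l] := by
        rw [groupAuxA, hcond]; rfl
      obtain ⟨h1, h2⟩ := ih (k + 1) (blocks ++ [cur]) [l] (by simp) (by omega) hdrop'
      rw [hstep]
      refine ⟨h1, ?_⟩
      rw [h2]
      simp only [Nat.add_sub_cancel, hgetDk, loopSpec, hc, if_true]
      simp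
    · have hcond : (!cur.isEmpty && decide (0 < k) && looksLikeInstitutionStart l
          && !looksLikeInstitutionStart ((PySem.List.pyGet? lines ((k : Int) - 1)).getD "")) = false := by
        rw [hprev]
        simp only [Bool.and_eq_true, not_and] at hc
        cases h1 : looksLikeInstitutionStart l <;>
          cases h2 : !looksLikeInstitutionStart (lines.getD (k - 1) "") <;> simp_all
      have hstep : groupAuxA lines k (l :: ls') blocks cur
          = groupAuxA lines (k + 1) ls' blocks (cur ++ [l]) := by
        rw [groupAuxA, hcond]; rfl
      obtain ⟨h1, h2⟩ := ih (k + 1) blocks (cur ++ [l]) (by simp) (by omega) hdrop'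
      rw [hstep]
      refine ⟨h1, ?_⟩
      rw [h2]
      simp only [Nat.add_sub_cancel, hgetDk, loopSpec]
      rw [if_neg (by simpa using hc)]


def finishB (lines : List String) (p : List (List String) × Int) : List (List String) :=
  p.1 ++ [PySem.List.slice lines (some p.2) none]

theorem altAux_spec (lines : List String) (k : Nat)
    (blocks : List (List String)) (prev : Nat)
    (hk : 1 ≤ k) (hkn : k ≤ lines.length) (hp : prev ≤ k) :
    finishB lines
      (((PySem.List.pyRange (k : Int) (lines.length : Int) 1).filter
        (fun i => PySem.List.pyGetD (lines.map looksLikeInstitutionStart) i false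
          && !(PySem.List.pyGetD (lines.map looksLikeInstitutionStart) (i - 1) false))).foldl
        (fun (st : List (List String) × Int) b =>
          (st.1 ++ [PySem.List.slice lines (some st.2) (some b)], b)) (blocks, (prev : Int)))
    = blocks ++ loopSpec (PySem.List.slice lines (some (prev : Int)) (some (k : Int)))
        (looksLikeInstitutionStart (lines.getD (k - 1) "")) (lines.drop k) := by
  generalize hm : lines.length - k = m
  induction m generalizing k blocks prev with
  | zero =>
    have hkeq : k = lines.length := by omega
    rw [PySem.List.pyRange_one_eq_nil (by omega)]
    simp only [List.filter_nil, List.foldl_nil, finishB]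
    rw [List.drop_eq_nil_of_le (by omega)]
    simp only [loopSpec]
    rw [PySem.List.slice_from_natCast, PySem.List.slice_natCast]
    rw [List.take_of_length_le (by simp; omega)]
  | succ m ih =>
    have hklt : k < lines.length := by omega
    have hflagk : PySem.List.pyGetD (lines.map looksLikeInstitutionStart) (k : Int) false
        = looksLikeInstitutionStart (lines.getD k "") := by
      rw [PySem.List.pyGetD_natCast]
      simp [List.getD, List.getElem?_map, List.getElem?_eq_getElem hklt]
    have hflagk1 : PySem.List.pyGetD (lines.map looksLikeInstitutionStart) ((k : Int) - 1) false
        = looksLikeInstitutionStart (lines.getD (k - 1) "") := by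
      have h1 : ((k : Int) - 1) = ((k - 1 : Nat) : Int) := by omega
      rw [h1, PySem.List.pyGetD_natCast]
      simp [List.getD, List.getElem?_map, List.getElem?_eq_getElem (show k - 1 < lines.length by omega)]
    have hdropk : lines.drop k = lines[k] :: lines.drop (k + 1) := List.drop_eq_getElem_cons hklt
    have hgetDk : lines.getD k "" = lines[k] := by simp [List.getD, List.getElem?_eq_getElem hklt]
    rw [PySem.List.pyRange_one_cons (by omega), List.filter_cons]
    simp only [hflagk, hflagk1, hgetDk]
    have hcast : ((k : Int) + 1) = (((k + 1 : Nat)) : Int) := by push_cast; ring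
    by_cases hc : (looksLikeInstitutionStart lines[k]
        && !looksLikeInstitutionStart (lines.getD (k - 1) "")) = true
    · rw [if_pos (by simpa using hc)]
      simp only [List.foldl_cons]
      have := ih (k + 1) (blocks ++ [PySem.List.slice lines (some (prev : Int)) (some (k : Int))]) k
        (by omega) (by omega) (by omega) (by omega)
      simp only [Nat.add_sub_cancel, hgetDk] at this
      rw [← hcast] at this
      rw [this, hdropk, loopSpec, if_pos hc]
      rw [show (PySem.List.slice lines (some ((k:Nat) : Int)) (some ((k:Int) + 1))) = [lines[k]] from by
        rw [hcast, PySem.List.slice_natCast, show k + 1 - k = 1 from by omega, hdropk]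
        rfl]
      simp
    · rw [if_neg (by simpa using hc)]
      have hslice : PySem.List.slice lines (some (prev : Int)) (some ((k + 1 : Nat) : Int))
          = PySem.List.slice lines (some (prev : Int)) (some (k : Int)) ++ [lines[k]] := by
        rw [PySem.List.slice_natCast, PySem.List.slice_natCast]
        have h1 : k + 1 - prev = (k - prev) + 1 := by omega
        rw [h1, List.take_add_one]
        have h2 : (lines.drop prev)[k - prev]? = some lines[k] := by
          rw [List.getElem?_drop]
          rw [show prev + (k - prev) = k from by omega]
          exact List.getElem?_eq_getElem hklt
        simp [h2]
      have := ih (k + 1) blocks prev (by omega) (by omega) (by omega) (by omega)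
      simp only [Nat.add_sub_cancel, hgetDk, hslice] at this
      rw [← hcast] at this
      rw [this, hdropk, loopSpec, if_neg (by simpa using hc)]

theorem group_education_lines_py_spec : Claim_equal_group_education_lines_py := by
  intro lines _
  unfold Spec_group_education_lines_py
  cases lines with
  | nil => rfl
  | cons l ls =>
    have hA : group_education_lines_py (l :: ls) = loopSpec [l] (looksLikeInstitutionStart l) ls := by
      obtain ⟨h1, h2⟩ := groupAuxA_spec (l :: ls) ls 1 [] [l] (by simp) (le_refl 1) rfl
      unfold group_education_lines_py
      have hstep : groupAuxA (l :: ls) 0 (l :: ls) [] [] = groupAuxA (l :: ls) 1 ls [] [l] := by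
        simp [groupAuxA]
      simp only [hstep]
      rw [if_neg (by simpa using h1)]
      simpa using h2
    have hB : group_education_lines_py_alt (l :: ls) = loopSpec [l] (looksLikeInstitutionStart l) ls := by
      have := altAux_spec (l :: ls) 1 [] 0 (le_refl 1) (by simp) (by omega)
      simp only [Nat.cast_one, Nat.cast_zero, finishB] at this
      simp only [group_education_lines_py_alt, List.isEmpty_cons, Bool.not_false, if_true]
      rw [this]
      simp [pysem, List.getD]
    rw [hA, hB]
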